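-- pv_equiv track=rewrite | github.com/AndreyVolkovBI/VkConnections | vkconnections/Helper.py | fill_all_the_vertices
-- ===== SOURCE A (Python) =====
-- def fill_all_the_vertices(circles):
--     tempDict = {}
--     for item in circles:
--         for index in circles[item]:
--             if index not in circles:
--                 if tempDict.get(index):
--                     tempDict[index].append(item)
--                 else:
--                     tempDict[index] = [item]
--     for item in tempDict:
--         circles[item] = tempDict[item]
--     return circles
-- ===== SOURCE B (Python) =====
-- def fill_all_the_vertices(circles):
--     orig = list(circles.items())
--     seen = set(circles)
--     missing = []
--     for _, adj in orig:
--         for v in adj: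
--             if v not in seen:
--                 seen.add(v)
--                 missing.append(v)
--     for v in missing:
--         circles[v] = [k for k, adj in orig for x in adj if x == v]
--     return circles
-- ===== Notes on version B (the rewrite author's own statement) =====
-- stated objective: alternative
-- what changed: Transposes the traversal: instead of scattering every edge into a staged tempDict and merging it in, B first collects the missing vertices (in first-appearance order) and then gathers each one's reverse-adjacency list by rescanning the original items.
import Mathlib
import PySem

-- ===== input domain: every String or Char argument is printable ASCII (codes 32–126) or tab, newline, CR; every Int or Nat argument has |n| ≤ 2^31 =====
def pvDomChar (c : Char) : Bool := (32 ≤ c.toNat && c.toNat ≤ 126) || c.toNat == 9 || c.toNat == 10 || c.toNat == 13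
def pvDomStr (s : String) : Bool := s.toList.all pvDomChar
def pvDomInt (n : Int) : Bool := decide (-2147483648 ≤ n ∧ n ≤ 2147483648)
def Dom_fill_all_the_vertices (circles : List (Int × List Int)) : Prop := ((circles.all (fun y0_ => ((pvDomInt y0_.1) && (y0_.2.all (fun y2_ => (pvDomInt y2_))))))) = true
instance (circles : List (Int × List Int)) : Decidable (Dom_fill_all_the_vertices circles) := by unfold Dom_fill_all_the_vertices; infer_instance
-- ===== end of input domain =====

-- B inverts A's traversal: instead of scattering every edge into a staged tempDict and then
-- merging it in, B first collects the missing vertices and then, for each one, GATHERS its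
-- reverse-adjacency list by rescanning the original items (objective: alternative — a
-- transposed, gather-based algorithm). Both Pythons mutate the argument dict in place the
-- same way; the theorems here are about the return value.

-- ===== PORT A =====
def pvAstep (c : PySem.Dict Int (List Int)) (item : Int)
    (t : PySem.Dict Int (List Int)) (index : Int) : PySem.Dict Int (List Int) :=
  if c.contains index then t
  else if t.getD index [] ≠ [] then t.modify index [] (fun l => l ++ [item])
  else t.insert index [item]

def fill_all_the_vertices (circles : List (Int × List Int)) : List (Int × List Int) :=
  let c : PySem.Dict Int (List Int) := PySem.Dict.mk circles
  let tempDict : PySem.Dict Int (List Int) :=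
    c.items.foldl (fun t p => (c.getD p.1 []).foldl (pvAstep c p.1) t) PySem.Dict.empty
  (tempDict.items.foldl (fun c2 q => c2.insert q.1 q.2) c).items

-- ===== PORT B =====
-- `if v not in seen: seen.add(v); missing.append(v)`
def pvMissStep (s : PySem.Set Int × List Int) (v : Int) : PySem.Set Int × List Int :=
  if PySem.Set.contains s.1 v then s else (PySem.Set.add s.1 v, s.2 ++ [v])

-- `[k for k, adj in orig for x in adj if x == v]`
def pvGather (orig : List (Int × List Int)) (v : Int) : List Int :=
  orig.flatMap (fun p => (p.2.filter (fun x => x == v)).map (fun _ => p.1))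

def fill_all_the_vertices_alt (circles : List (Int × List Int)) : List (Int × List Int) :=
  let orig : List (Int × List Int) := circles
  let seen0 : PySem.Set Int := PySem.Set.ofList (circles.map Prod.fst)
  let missing : List Int :=
    (orig.foldl (fun s p => p.2.foldl pvMissStep s) (seen0, [])).2
  (missing.foldl (fun d v => d.insert v (pvGather orig v)) (PySem.Dict.mk circles)).items

-- ===== PRECONDITION & SPEC =====
-- Pre_ excludes association lists with duplicate keys: they do not represent any Python dict
-- argument (a Python dict's keys are unique), so the Python A is never run on them.
def Pre_fill_all_the_vertices (circles : List (Int × List Int)) : Prop :=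
  (circles.map Prod.fst).Nodup
instance (circles : List (Int × List Int)) : Decidable (Pre_fill_all_the_vertices circles) := by
  unfold Pre_fill_all_the_vertices; infer_instance

def pvWitness_fill_all_the_vertices : (List (Int × List Int)) := [(1, [2, 3]), (2, [1])]

def Spec_fill_all_the_vertices (circles : List (Int × List Int)) (out : List (Int × List Int)) : Prop := out = fill_all_the_vertices_alt circles
instance (circles : List (Int × List Int)) (out : List (Int × List Int)) : Decidable (Spec_fill_all_the_vertices circles out) := by unfold Spec_fill_all_the_vertices; infer_instance

-- ===== CLAIM (what is proved, stated in full; the proofs are below) =====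
def Claim_equal_fill_all_the_vertices : Prop := ∀ (circles : List (Int × List Int)), Dom_fill_all_the_vertices circles → Pre_fill_all_the_vertices circles → Spec_fill_all_the_vertices circles (fill_all_the_vertices circles)

-- ===== LEMMAS AND PROOFS =====

-- for a key A has collected, its stored list is a value of the dict (so nonempty by invariant)
theorem pv_getD_mem_values (d : PySem.Dict Int (List Int)) (k : Int) (h : d.contains k = true) :
    d.getD k [] ∈ d.values := by
  have := PySem.Dict.contains_eq_isSome_get? (d := d) (k := k)
  rw [h] at this
  obtain ⟨v, hv⟩ := Option.isSome_iff_exists.mp this.symm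
  have hm := PySem.Dict.mem_items_of_get?_eq_some d hv
  have he : d.getD k [] = v := PySem.Dict.getD_of_get?_eq_some d [] hv
  rw [he]
  exact List.mem_map_of_mem hm

-- the edge list both nested loops traverse, flattened
def pvEdges (circles : List (Int × List Int)) : List (Int × Int) :=
  circles.flatMap (fun p => p.2.map (fun x => (p.1, x)))

theorem pv_main (c : PySem.Dict Int (List Int)) (E : List (Int × Int)) :
    ∀ (t : PySem.Dict Int (List Int)) (m : List Int),
    t.keys = m → m.Nodup → (∀ v ∈ m, c.contains v = false) → (∀ w ∈ t.values, w ≠ []) →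
    (E.foldl (fun s e => pvMissStep s e.2) (c.keys ++ m, m))
        = (c.keys ++ (E.foldl (fun t e => pvAstep c e.1 t e.2) t).keys,
           (E.foldl (fun t e => pvAstep c e.1 t e.2) t).keys)
    ∧ (E.foldl (fun t e => pvAstep c e.1 t e.2) t).keys.Nodup
    ∧ (∀ v ∈ (E.foldl (fun t e => pvAstep c e.1 t e.2) t).keys, c.contains v = false)
    ∧ (∀ w ∈ (E.foldl (fun t e => pvAstep c e.1 t e.2) t).values, w ≠ [])
    ∧ (∀ v, (E.foldl (fun t e => pvAstep c e.1 t e.2) t).getD v []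
          = t.getD v [] ++ if c.contains v then [] else (E.filter (fun e => e.2 == v)).map Prod.fst) := by
  induction E with
  | nil =>
    intro t m hk hnd hfresh hval
    refine ⟨by simp [hk], hk ▸ hnd, hk ▸ hfresh, hval, fun v => by split_ifs <;> simp⟩
  | cons e E ih =>
    intro t m hk hnd hfresh hval
    obtain ⟨it, ix⟩ := e
    simp only [List.foldl_cons]
    by_cases hc : c.contains ix = true
    · -- edge target is an original key: both loops skip it
      have hckey : ix ∈ c.keys := by
        rw [PySem.Dict.contains_eq_decide_mem_keys] at hc
        simpa using hc
      have hsk : PySem.Set.contains (c.keys ++ m) ix = true := by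
        simp [PySem.Set.contains]
        exact Or.inl hckey
      have hA : pvAstep c it t ix = t := by simp [pvAstep, hc]
      have hB : pvMissStep (c.keys ++ m, m) ix = (c.keys ++ m, m) := by
        simp only [pvMissStep]; rw [hsk]; simp
      rw [hA, hB]
      obtain ⟨h1, h2, h3, h4, h5⟩ := ih t m hk hnd hfresh hval
      refine ⟨h1, h2, h3, h4, fun v => ?_⟩
      rw [h5 v]
      by_cases hv : c.contains v = true
      · simp [hv]
      · have hne : (ix == v) = false := by
          simpa using fun h : ix = v => hv (h ▸ hc)
        simp [hv, hne]
    · have hcf : c.contains ix = false := by simpa using hc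
      have hckeys : ix ∉ c.keys := by
        rw [PySem.Dict.contains_eq_decide_mem_keys] at hcf
        simpa using hcf
      by_cases hm : ix ∈ m
      · -- already collected: A appends to its list, B skips
        have htc : t.contains ix = true := by
          rw [PySem.Dict.contains_eq_decide_mem_keys, hk]
          simpa using hm
        have hne : t.getD ix [] ≠ [] := hval _ (pv_getD_mem_values t ix htc)
        have hA : pvAstep c it t ix = t.insert ix (t.getD ix [] ++ [it]) := by
          simp [pvAstep, hcf, hne, PySem.Dict.modify]
        have hsk : PySem.Set.contains (c.keys ++ m) ix = true := by
          simp [PySem.Set.contains]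
          exact Or.inr hm
        have hB : pvMissStep (c.keys ++ m, m) ix = (c.keys ++ m, m) := by
          simp only [pvMissStep]; rw [hsk]; simp
        rw [hA, hB]
        have hk' : (t.insert ix (t.getD ix [] ++ [it])).keys = m := by
          rw [PySem.Dict.keys_insert_of_contains (d := t) (k := ix) (v := t.getD ix [] ++ [it]) htc, hk]
        have hval' : ∀ w ∈ (t.insert ix (t.getD ix [] ++ [it])).values, w ≠ [] := by
          intro w hw
          rcases PySem.Dict.mem_values_insert t ix _ w hw with rfl | hw'
          · simp
          · exact hval w hw'
        obtain ⟨h1, h2, h3, h4, h5⟩ := ih _ m hk' hnd hfresh hval'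
        refine ⟨h1, h2, h3, h4, fun v => ?_⟩
        rw [h5 v]
        by_cases hv : v = ix
        · subst hv
          rw [PySem.Dict.getD_insert_self]
          simp [hcf]
        · rw [PySem.Dict.getD_insert_of_ne (d := t) (v := t.getD ix [] ++ [it]) (d0 := []) (hne := hv)]
          by_cases hcv : c.contains v = true
          · simp [hcv]
          · have hne : (ix == v) = false := by simpa using fun h : ix = v => hv h.symm
            simp [hcv, hne]
      · -- genuinely new vertex: A inserts a fresh key, B records it in `missing`
        have htc : t.contains ix = false := by
          rw [PySem.Dict.contains_eq_decide_mem_keys, hk]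
          simpa using hm
        have hgd : t.getD ix [] = [] := PySem.Dict.getD_of_not_contains t [] htc
        have hA : pvAstep c it t ix = t.insert ix [it] := by
          simp [pvAstep, hcf, hgd]
        have hsk : PySem.Set.contains (c.keys ++ m) ix = false := by
          simp [PySem.Set.contains]
          exact ⟨hckeys, hm⟩
        have hadd : PySem.Set.add (c.keys ++ m) ix = (c.keys ++ m) ++ [ix] := by
          simp [PySem.Set.add]
          exact ⟨hckeys, hm⟩
        have hB : pvMissStep (c.keys ++ m, m) ix = (c.keys ++ (m ++ [ix]), m ++ [ix]) := by
          simp only [pvMissStep]; rw [hsk, hadd]; simp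
        rw [hA, hB]
        have hk' : (t.insert ix [it]).keys = m ++ [ix] := by
          rw [PySem.Dict.keys_insert_of_not_contains (d := t) (k := ix) (v := [it]) htc, hk]
        have hnd' : (m ++ [ix]).Nodup := by
          simp [List.nodup_append, hnd]
          exact fun a ha h => hm (h ▸ ha)
        have hfresh' : ∀ v ∈ m ++ [ix], c.contains v = false := by
          intro v hv
          rcases List.mem_append.mp hv with h | h
          · exact hfresh v h
          · simp at h; subst h; exact hcf
        have hval' : ∀ w ∈ (t.insert ix [it]).values, w ≠ [] := by
          intro w hw
          rcases PySem.Dict.mem_values_insert t ix _ w hw with rfl | hw'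
          · simp
          · exact hval w hw'
        obtain ⟨h1, h2, h3, h4, h5⟩ := ih _ (m ++ [ix]) hk' hnd' hfresh' hval'
        refine ⟨h1, h2, h3, h4, fun v => ?_⟩
        rw [h5 v]
        by_cases hv : v = ix
        · subst hv
          rw [PySem.Dict.getD_insert_self, hgd]
          simp [hcf]
        · rw [PySem.Dict.getD_insert_of_ne (d := t) (v := [it]) (d0 := []) (hne := hv)]
          by_cases hcv : c.contains v = true
          · simp [hcv]
          · have hne : (ix == v) = false := by simpa using fun h : ix = v => hv h.symm
            simp [hcv, hne]

theorem pv_foldl_flat {σ : Type} (l : List (Int × List Int)) (g : σ → Int × Int → σ) (s : σ) :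
    l.foldl (fun s p => p.2.foldl (fun s x => g s (p.1, x)) s) s
      = (l.flatMap (fun p => p.2.map (fun x => (p.1, x)))).foldl g s := by
  induction l generalizing s with
  | nil => rfl
  | cons p l ih => simp [List.foldl_map, ih]

-- B's per-vertex gather = the filtered flattened edge list
theorem pv_gather_eq (circles : List (Int × List Int)) (v : Int) :
    ((pvEdges circles).filter (fun e => e.2 == v)).map Prod.fst = pvGather circles v := by
  simp [pvEdges, pvGather, List.filter_flatMap, List.map_flatMap, List.filter_map, List.map_map,
    Function.comp_def]

theorem pv_final (circles : List (Int × List Int)) (hpre : (circles.map Prod.fst).Nodup) :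
    fill_all_the_vertices circles = fill_all_the_vertices_alt circles := by
  set c : PySem.Dict Int (List Int) := PySem.Dict.mk circles with hc
  have hkeys : c.keys = circles.map Prod.fst := rfl
  -- A's nested scatter loop, flattened over the edge list
  have hAflat : c.items.foldl (fun t p => (c.getD p.1 []).foldl (pvAstep c p.1) t) PySem.Dict.empty
      = (pvEdges circles).foldl (fun t e => pvAstep c e.1 t e.2) PySem.Dict.empty := by
    have hlook : ∀ (t : PySem.Dict Int (List Int)) (p : Int × List Int), p ∈ circles →
        (c.getD p.1 []).foldl (pvAstep c p.1) t = p.2.foldl (pvAstep c p.1) t := by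
      intro t p hp
      rw [PySem.Dict.getD_of_mem_items (d := c) (k := p.1) (v := p.2) hp (by rw [hkeys]; exact hpre)]
    rw [show c.items = circles from rfl]
    rw [PySem.List.foldl_congr_mem circles _ (fun t p => p.2.foldl (pvAstep c p.1) t) PySem.Dict.empty (fun acc x hx => hlook acc x hx)]
    exact pv_foldl_flat circles (fun t e => pvAstep c e.1 t e.2) PySem.Dict.empty
  -- B's nested missing-collection loop, flattened over the same edge list
  have hBflat : circles.foldl (fun s p => p.2.foldl pvMissStep s)
        (PySem.Set.ofList (circles.map Prod.fst), ([] : List Int))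
      = (pvEdges circles).foldl (fun s e => pvMissStep s e.2)
        (PySem.Set.ofList (circles.map Prod.fst), ([] : List Int)) := by
    exact pv_foldl_flat circles (fun s e => pvMissStep s e.2) _
  have hseen0 : PySem.Set.ofList (circles.map Prod.fst) = c.keys := by
    rw [hkeys]; simp [pysem, hpre]
  obtain ⟨h1, h2, h3, _, h5⟩ := pv_main c (pvEdges circles) PySem.Dict.empty []
    (by rfl) (by simp) (by simp) (by simp [PySem.Dict.values, PySem.Dict.empty])
  set T := (pvEdges circles).foldl (fun t e => pvAstep c e.1 t e.2) PySem.Dict.empty with hT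
  set K := T.keys with hK
  have hmiss : ((pvEdges circles).foldl (fun s e => pvMissStep s e.2)
      (PySem.Set.ofList (circles.map Prod.fst), ([] : List Int))).2 = K := by
    rw [hseen0, show (c.keys, ([] : List Int)) = (c.keys ++ [], []) from by simp, h1]
  -- A's tempDict items, via its keys and per-key contents
  have hTitems : T.items = K.map (fun v => (v, pvGather circles v)) := by
    rw [PySem.Dict.items_eq_map_keys T h2 []]
    apply List.map_congr_left
    intro v hv
    rw [h5 v, h3 v hv]
    simp [pv_gather_eq]
  -- the two final build loops, both appending the same fresh pairs to `circles`
  simp only [fill_all_the_vertices]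
  rw [hAflat]
  have hfreshT : ∀ a ∈ T.items, c.contains a.1 = false := by
    intro a ha
    exact h3 a.1 (List.mem_map_of_mem ha)
  have hndT : (T.items.map Prod.fst).Nodup := h2
  rw [PySem.Dict.items_foldl_insert_fresh T.items Prod.fst Prod.snd c hfreshT hndT]
  simp only [fill_all_the_vertices_alt]
  rw [hBflat, hmiss]
  have hfreshK : ∀ v ∈ K, c.contains v = false := h3
  rw [PySem.Dict.items_foldl_insert_fresh K (fun v => v) (fun v => pvGather circles v) c hfreshK (by simpa using h2)]
  rw [hTitems]
  simp

-- ===== VERDICT (by name: the statement is the Claim_ definition above) =====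
theorem fill_all_the_vertices_spec : Claim_equal_fill_all_the_vertices := by
  intro circles _ hpre
  unfold Spec_fill_all_the_vertices
  exact pv_final circles hpre
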